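-- pv_equiv track=rewrite | github.com/rodolfomeira/aps_python_criptografia_cifra_de_vigenere | aps_python_criptografia_cifra_de_vigenere-cesar.py | gerar_chave
-- ===== SOURCE A (Python) =====
-- def preparar_texto(texto):
--     # Inicializa a variavel vazia para armazenar caracteres do texto.
--     resultado = ''
--
--     # Itera sobre cada caractere em 'texto'.
--     for letra in texto:
--         # Adiciona o caractere à letra 'resultado'.
--         resultado += letra
--     # Retorna a letra 'resultado' apenas com os caracteres.
--     return resultado
--
-- def gerar_chave(texto, chave):
--     # Remove caracteres indesejados da chave.
--     chave = preparar_texto(chave)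
--     # Converte a chave em uma lista para permitir modificação.
--     chave = list(chave)
--
--     # Verifica se a chave está vazia e lança um erro se necessário.
--     if len(chave) == 0:
--         raise ValueError('A chave não pode ser vazia.')
--
--     # Expande a chave repetindo seus caracteres até que tenha o mesmo tamanho de 'texto'.
--     for indice in range(len(texto) - len(chave)):
--         # Adiciona caracteres da chave original ciclicamente.
--         chave.append(chave[indice % len(chave)])
--
--     # Retorna a chave em forma de lista de inteiros, onde 'a' = 0, 'b' = 1, etc.
--     return [ord(c) - ord('a') for c in chave]
-- ===== SOURCE B (Python) =====
-- def gerar_chave(texto, chave):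
--     # Block replication: translate the key to codes ONCE, then build the result
--     # as whole-key blocks plus a remainder prefix -- no per-position cyclic indexing.
--     k = len(chave)
--     if k == 0:
--         raise ValueError('A chave não pode ser vazia.')
--     codes = [ord(c) - ord('a') for c in chave]
--     n = max(len(texto), k)
--     return codes * (n // k) + codes[:n % k]
-- ===== Notes on version B (the rewrite author's own statement) =====
-- stated objective: alternative
-- what changed: A grows the key list one character at a time, each step self-referentially indexing the growing list (after a char-by-char copy helper); B translates the key to codes once and builds the result by whole-block list replication (codes * (n//k)) plus a remainder prefix slice, with no per-position cyclic indexing and no growing state.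
import Mathlib
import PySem

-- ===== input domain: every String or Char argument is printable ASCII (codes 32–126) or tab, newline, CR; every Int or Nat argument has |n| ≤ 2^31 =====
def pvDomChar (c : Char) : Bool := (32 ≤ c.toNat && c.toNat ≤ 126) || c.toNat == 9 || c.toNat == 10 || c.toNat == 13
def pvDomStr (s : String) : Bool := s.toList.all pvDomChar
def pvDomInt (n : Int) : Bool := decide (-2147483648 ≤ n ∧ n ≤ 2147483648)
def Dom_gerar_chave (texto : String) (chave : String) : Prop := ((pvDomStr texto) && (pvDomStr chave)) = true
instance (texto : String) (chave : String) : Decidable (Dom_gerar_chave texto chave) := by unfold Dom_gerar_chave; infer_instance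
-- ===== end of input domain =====

-- B translates the key to codes once and builds the result by whole-block replication plus a
-- remainder prefix, instead of A's growing-list loop with cyclic self-indexing; objective: alternative.

-- ===== PORT A =====
-- preparar_texto: builds the key character by character (a copy)
def pvPreparar (cs : List Char) : List Char := cs.foldl (fun r c => r ++ [c]) []

def gerar_chave (texto : String) (chave : String) : List Int :=
  let ch0 := pvPreparar chave.toList
  if ch0.length = 0 then []   -- Python raises ValueError here; excluded by Pre_
  else
    ((PySem.List.pyRange 0 ((texto.toList.length : Int) - (ch0.length : Int)) 1).foldl
      (fun ch i => ch ++ [PySem.List.pyGetD ch (PySem.Int.mod i (ch.length : Int)) 'a']) ch0).map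
      (fun c => (c.toNat : Int) - 97)

-- ===== PORT B =====
def gerar_chave_alt (texto : String) (chave : String) : List Int :=
  let k := chave.toList.length
  if k = 0 then []            -- Python raises ValueError here; excluded by Pre_
  else
    let codes := chave.toList.map (fun c => (c.toNat : Int) - 97)
    let n := max texto.toList.length k
    (List.replicate (n / k) codes).flatten ++ codes.take (n % k)

-- ===== PRECONDITION & SPEC =====
-- Both Pythons raise ValueError on an empty key; Pre_ excludes exactly that.
def Pre_gerar_chave (texto : String) (chave : String) : Prop := chave.toList ≠ []
instance (texto : String) (chave : String) : Decidable (Pre_gerar_chave texto chave) := by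
  unfold Pre_gerar_chave; infer_instance

def pvWitness_gerar_chave : String × String := ("abcde", "ky")

def Spec_gerar_chave (texto : String) (chave : String) (out : List Int) : Prop := out = gerar_chave_alt texto chave
instance (texto : String) (chave : String) (out : List Int) : Decidable (Spec_gerar_chave texto chave out) := by unfold Spec_gerar_chave; infer_instance

-- ===== CLAIM (what is proved, stated in full; the proofs are below) =====
def Claim_equal_gerar_chave : Prop := ∀ (texto : String) (chave : String), Dom_gerar_chave texto chave → Pre_gerar_chave texto chave → Spec_gerar_chave texto chave (gerar_chave texto chave)

-- ===== LEMMAS AND PROOFS =====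

-- the periodic extension of cs (period cs.length) as a function of the position
def pvPer (cs : List Char) (j : Nat) : Char := cs.getD (j % cs.length) 'a'

theorem pvPreparar_id (cs : List Char) : pvPreparar cs = cs := by
  have h : ∀ (acc : List Char), cs.foldl (fun r c => r ++ [c]) acc = acc ++ cs := by
    induction cs with
    | nil => intro acc; simp
    | cons c cs ih => intro acc; simp [List.foldl, ih]
  exact (h []).trans (by simp)

theorem pvRange_map_per (cs : List Char) :
    (List.range cs.length).map (pvPer cs) = cs := by
  apply List.ext_getElem
  · simp
  · intro j h1 h2
    simp only [List.getElem_map, List.getElem_range, pvPer]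
    have hj : j < cs.length := by simpa using h2
    rw [Nat.mod_eq_of_lt hj, List.getD_eq_getElem _ _ hj]

theorem pvLoopA (cs : List Char) (hk : cs ≠ []) (m : Nat) :
    (PySem.List.pyRange 0 (m : Int) 1).foldl
      (fun ch i => ch ++ [PySem.List.pyGetD ch (PySem.Int.mod i (ch.length : Int)) 'a']) cs
    = (List.range (cs.length + m)).map (pvPer cs) := by
  induction m with
  | zero =>
    simp [pvRange_map_per cs]
  | succ m ih =>
    have hcast : ((m + 1 : Nat) : Int) = (m : Int) + 1 := by push_cast; ring
    rw [hcast, PySem.List.pyRange_one_succ_right (by positivity), List.foldl_append, ih]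
    have hlen : ((List.range (cs.length + m)).map (pvPer cs)).length = cs.length + m := by simp
    have hkpos : 0 < cs.length := List.length_pos_of_ne_nil hk
    have hmlt : m < cs.length + m := by omega
    have hmod : PySem.Int.mod (m : Int) (((List.range (cs.length + m)).map (pvPer cs)).length : Int)
        = (m : Int) := by
      rw [hlen, PySem.Int.mod_natCast]
      exact_mod_cast Nat.mod_eq_of_lt hmlt
    have hget : ((List.range (cs.length + m)).map (pvPer cs)).getD m 'a' = pvPer cs m := by
      have h := List.getD_eq_getElem ((List.range (cs.length + m)).map (pvPer cs)) 'a'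
        (n := m) (by simp only [List.length_map, List.length_range]; omega)
      simpa using h
    have hper : pvPer cs (cs.length + m) = pvPer cs m := by
      simp [pvPer, Nat.add_mod_left]
    rw [List.foldl_cons, List.foldl_nil, hmod, PySem.List.pyGetD_natCast, hget,
      show cs.length + (m + 1) = (cs.length + m) + 1 from rfl, List.range_succ, List.map_append]
    simp [hper]

-- A's result characterised: the periodic extension to length max(len texto, len chave)
theorem pvA_eq (texto chave : String) (hk : chave.toList ≠ []) :
    gerar_chave texto chave
    = (List.range (max texto.toList.length chave.toList.length)).map
        (fun j => ((pvPer chave.toList j).toNat : Int) - 97) := by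
  have hkpos : 0 < chave.toList.length := List.length_pos_of_ne_nil hk
  unfold gerar_chave
  rw [pvPreparar_id]
  rw [if_neg (by omega)]
  by_cases h : chave.toList.length ≤ texto.toList.length
  · have hm : (texto.toList.length : Int) - (chave.toList.length : Int)
        = ((texto.toList.length - chave.toList.length : Nat) : Int) := by
      push_cast [h]; ring
    rw [hm, pvLoopA chave.toList hk]
    have : chave.toList.length + (texto.toList.length - chave.toList.length)
        = max texto.toList.length chave.toList.length := by omega
    rw [this, List.map_map]
    simp [Function.comp]
  · have hm : PySem.List.pyRange 0 ((texto.toList.length : Int) - (chave.toList.length : Int)) 1 = [] :=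
      PySem.List.pyRange_one_eq_nil (by omega)
    rw [hm]
    simp only [List.foldl_nil]
    have hmax : max texto.toList.length chave.toList.length = chave.toList.length := by omega
    rw [hmax, show (fun j => (((pvPer chave.toList j).toNat : Int)) - 97)
        = ((fun c => ((c.toNat : Int)) - 97) ∘ pvPer chave.toList) from rfl,
      ← List.map_map, pvRange_map_per chave.toList]

-- the periodic extension written as whole blocks plus a remainder prefix
theorem pvPer_block (cs : List Char) (hk : cs ≠ []) (q r : Nat) (hr : r < cs.length) :
    (List.range (q * cs.length + r)).map (pvPer cs)
    = (List.replicate q cs).flatten ++ cs.take r := by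
  induction q with
  | zero =>
    have h : (List.range r).map (pvPer cs) = cs.take r := by
      calc (List.range r).map (pvPer cs)
          = ((List.range cs.length).take r).map (pvPer cs) := by
            rw [List.take_range, min_eq_left hr.le]
        _ = ((List.range cs.length).map (pvPer cs)).take r := by rw [List.map_take]
        _ = cs.take r := by rw [pvRange_map_per]
    simpa using h
  | succ q ih =>
    have hsplit : (q + 1) * cs.length + r = cs.length + (q * cs.length + r) := by ring
    rw [hsplit, List.range_add, List.map_append, List.map_map, pvRange_map_per]
    have hshift : ((List.range (q * cs.length + r)).map (pvPer cs ∘ (cs.length + ·)))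
        = (List.range (q * cs.length + r)).map (pvPer cs) := by
      apply List.map_congr_left
      intro j _
      simp [Function.comp, pvPer, Nat.add_mod_left]
    rw [hshift, ih]
    simp [List.replicate_succ]

-- B's result characterised the same way
theorem pvB_eq (texto chave : String) (hk : chave.toList ≠ []) :
    gerar_chave_alt texto chave
    = (List.range (max texto.toList.length chave.toList.length)).map
        (fun j => ((pvPer chave.toList j).toNat : Int) - 97) := by
  have hkpos : 0 < chave.toList.length := List.length_pos_of_ne_nil hk
  unfold gerar_chave_alt
  rw [if_neg (by omega)]
  set g : Char → Int := fun c => (c.toNat : Int) - 97 with hg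
  set n := max texto.toList.length chave.toList.length with hn
  have hdm : n / chave.toList.length * chave.toList.length + n % chave.toList.length = n := by
    rw [Nat.mul_comm]; exact Nat.div_add_mod n _
  have hr : n % chave.toList.length < chave.toList.length := Nat.mod_lt _ hkpos
  calc (List.replicate (n / chave.toList.length) (chave.toList.map g)).flatten
        ++ (chave.toList.map g).take (n % chave.toList.length)
      = ((List.replicate (n / chave.toList.length) chave.toList).flatten
          ++ chave.toList.take (n % chave.toList.length)).map g := by
        simp [List.map_take, List.map_flatten, List.map_replicate]
    _ = ((List.range (n / chave.toList.length * chave.toList.length + n % chave.toList.length)).map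
          (pvPer chave.toList)).map g := by
        rw [pvPer_block chave.toList hk _ _ hr]
    _ = (List.range n).map (fun j => g (pvPer chave.toList j)) := by
        rw [hdm, List.map_map]; rfl

-- ===== VERDICT (by name: the statement is the Claim_ definition above) =====
theorem gerar_chave_spec : Claim_equal_gerar_chave := by
  intro texto chave _ hpre
  unfold Spec_gerar_chave
  rw [pvA_eq texto chave hpre, pvB_eq texto chave hpre]
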